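-- pv_equiv track=rewrite | github.com/hermes-design/hermes-design.github.io | seaa22025/python/main.py | generate_module
-- ===== SOURCE A (Python) =====
-- def generate_module(name, tasks_number, task_id):
--     """Generates a module definition with specified variables and transitions.
--
--     Args:
--         name: The name of the module.
--         tasks_number: The number of tasks in the module.
--         task_id: A unique identifier for the module.
--
--     Returns:
--         A tuple containing the module name, variable list, position, and transition list.
--     """
--
--     var_list = []
--     position = f"{task_id}_P"  # Use f-string for better readability
--     transition_list = []
--
--     for nb in range(1, tasks_number + 1):  # Include the last task
--         resultat = f"{task_id}_{nb}"
--         var_list.append(resultat)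
--
--     for nb in range(len(var_list) - 1):
--         resultat = (
--             f"  [a_{var_list[nb]}] {var_list[nb]} = true & {task_id}_P = "
--             f"-> (1 - Prob{var_list[nb]}):("
--             f"{var_list[nb]}' = false) & ({var_list[nb + 1]}' = true) & ({task_id}_P' = )"
--             f"+ Prob{var_list[nb]}:("
--             f"{var_list[nb]}' = true);"
--         )
--         transition_list.append(resultat)
--
--     resultat = (
--         f"  [a_{var_list[len(var_list)-1]}] {var_list[len(var_list)-1]} = true & {task_id}_P = "
--         f"-> (1 - Prob{var_list[len(var_list)-1]}):("
--         f"{var_list[len(var_list)-1]}' = false) & ({var_list[0]}' = true) & ({task_id}_P' = )"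
--         f"+ Prob{var_list[len(var_list)-1]}:("
--         f"{var_list[len(var_list)-1]}' = true);"
--     )
--     transition_list.append(resultat)
--
--     return name, var_list, position, transition_list
-- ===== SOURCE B (Python) =====
-- def generate_module(name, tasks_number, task_id):
--     var_list = [f"{task_id}_{nb}" for nb in range(1, tasks_number + 1)]
--     position = f"{task_id}_P"
--     next_vars = var_list[1:] + [var_list[0]]
--     transition_list = [
--         f"  [a_{cur}] {cur} = true & {task_id}_P = "
--         f"-> (1 - Prob{cur}):("
--         f"{cur}' = false) & ({nxt}' = true) & ({task_id}_P' = )"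
--         f"+ Prob{cur}:("
--         f"{cur}' = true);"
--         for cur, nxt in zip(var_list, next_vars)
--     ]
--     return name, var_list, position, transition_list
-- ===== Notes on version B (the rewrite author's own statement) =====
-- stated objective: simpler
-- what changed: A's second loop over range(len-1) plus a separately hand-built wraparound transition are replaced by one uniform comprehension over zip(var_list, rotated var_list), eliminating all index arithmetic and the duplicated transition template.
import Mathlib
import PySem

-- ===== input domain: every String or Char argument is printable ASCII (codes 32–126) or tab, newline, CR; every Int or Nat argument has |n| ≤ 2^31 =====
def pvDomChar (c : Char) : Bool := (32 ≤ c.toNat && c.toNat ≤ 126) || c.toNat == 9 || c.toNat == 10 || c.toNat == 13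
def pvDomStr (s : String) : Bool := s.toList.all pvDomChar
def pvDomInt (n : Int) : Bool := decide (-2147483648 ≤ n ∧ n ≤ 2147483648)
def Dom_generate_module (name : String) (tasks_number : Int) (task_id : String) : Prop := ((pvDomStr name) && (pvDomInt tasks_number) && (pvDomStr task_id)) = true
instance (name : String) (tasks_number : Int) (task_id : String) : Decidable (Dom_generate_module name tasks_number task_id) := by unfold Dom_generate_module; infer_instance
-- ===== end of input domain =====

-- B replaces A's n-1 loop plus hand-written wraparound transition by one uniform zip pass
-- over the list and its rotation (objective: simpler); return value only, no mutation involved.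

-- ===== PORT A =====
def generate_module (name : String) (tasks_number : Int) (task_id : String) : String × List String × String × List String :=
  let var_list := (PySem.List.pyRange 1 (tasks_number + 1) 1).map
    (fun nb => task_id ++ "_" ++ PySem.Int.toStr nb)
  let position := task_id ++ "_P"
  let transition_list := (List.range (var_list.length - 1)).foldl (fun acc nb =>
    acc ++ ["  [a_" ++ var_list.getD nb "" ++ "] " ++ var_list.getD nb "" ++ " = true & "
      ++ task_id ++ "_P = " ++ "-> (1 - Prob" ++ var_list.getD nb "" ++ "):("
      ++ var_list.getD nb "" ++ "' = false) & (" ++ var_list.getD (nb + 1) "" ++ "' = true) & ("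
      ++ task_id ++ "_P' = )" ++ "+ Prob" ++ var_list.getD nb "" ++ ":("
      ++ var_list.getD nb "" ++ "' = true);"]) []
  let last := var_list.getD (var_list.length - 1) ""   -- var_list[len(var_list)-1]; Pre_ keeps var_list nonempty
  let transition_list := transition_list ++
    ["  [a_" ++ last ++ "] " ++ last ++ " = true & "
      ++ task_id ++ "_P = " ++ "-> (1 - Prob" ++ last ++ "):("
      ++ last ++ "' = false) & (" ++ var_list.getD 0 "" ++ "' = true) & ("
      ++ task_id ++ "_P' = )" ++ "+ Prob" ++ last ++ ":("
      ++ last ++ "' = true);"]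
  (name, var_list, position, transition_list)

-- ===== PORT B =====
def generate_module_alt (name : String) (tasks_number : Int) (task_id : String) : String × List String × String × List String :=
  let var_list := (PySem.List.pyRange 1 (tasks_number + 1) 1).map
    (fun nb => task_id ++ "_" ++ PySem.Int.toStr nb)
  let position := task_id ++ "_P"
  let next_vars := var_list.drop 1 ++ [var_list.getD 0 ""]   -- var_list[1:] + [var_list[0]]; Pre_ keeps var_list nonempty
  let transition_list := (var_list.zip next_vars).map (fun cn =>
    "  [a_" ++ cn.1 ++ "] " ++ cn.1 ++ " = true & "
      ++ task_id ++ "_P = " ++ "-> (1 - Prob" ++ cn.1 ++ "):("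
      ++ cn.1 ++ "' = false) & (" ++ cn.2 ++ "' = true) & ("
      ++ task_id ++ "_P' = )" ++ "+ Prob" ++ cn.1 ++ ":("
      ++ cn.1 ++ "' = true);")
  (name, var_list, position, transition_list)

-- ===== PRECONDITION & SPEC =====
-- Pre_ excludes tasks_number < 1, where var_list is empty and A raises IndexError on var_list[len(var_list)-1].
def Pre_generate_module (name : String) (tasks_number : Int) (task_id : String) : Prop := 1 ≤ tasks_number
instance (name : String) (tasks_number : Int) (task_id : String) : Decidable (Pre_generate_module name tasks_number task_id) := by unfold Pre_generate_module; infer_instance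
def pvWitness_generate_module : String × Int × String := ("m", 2, "t")
def Spec_generate_module (name : String) (tasks_number : Int) (task_id : String) (out : String × List String × String × List String) : Prop := out = generate_module_alt name tasks_number task_id
instance (name : String) (tasks_number : Int) (task_id : String) (out : String × List String × String × List String) : Decidable (Spec_generate_module name tasks_number task_id out) := by unfold Spec_generate_module; infer_instance

-- ===== CLAIM (what is proved, stated in full; the proofs are below) =====
def Claim_equal_generate_module : Prop := ∀ (name : String) (tasks_number : Int) (task_id : String), Dom_generate_module name tasks_number task_id → Pre_generate_module name tasks_number task_id → Spec_generate_module name tasks_number task_id (generate_module name tasks_number task_id)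

-- ===== LEMMAS AND PROOFS =====

-- Core loop fact: A's indexed loop over range(len-1) followed by the appended wraparound
-- transition equals B's single map over the zip of l with its rotation, for any nonempty l.
theorem pv_loop_eq (f : String → String → String) (l : List String) (h : l ≠ []) :
    (List.range (l.length - 1)).foldl
        (fun acc nb => acc ++ [f (l.getD nb "") (l.getD (nb + 1) "")]) []
      ++ [f (l.getD (l.length - 1) "") (l.getD 0 "")]
    = (l.zip (l.drop 1 ++ [l.getD 0 ""])).map (fun cn => f cn.1 cn.2) := by
  rw [PySem.List.foldl_append_singleton_eq_map]
  have hn : 0 < l.length := List.length_pos_iff.mpr h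
  apply List.ext_getElem
  · simp only [List.length_append, List.length_map, List.length_range, List.length_zip,
      List.length_drop, List.length_cons, List.length_nil, List.nil_append]
    omega
  · intro i h1 h2
    have hi : i < l.length := by
      simp only [List.length_map, List.length_zip, List.length_drop, List.length_append,
        List.length_cons, List.length_nil, Nat.min_def] at h2
      split at h2 <;> omega
    rw [List.getElem_map, List.getElem_zip]
    simp only [List.nil_append]
    by_cases hcase : i < l.length - 1
    · rw [List.getElem_append_left (by simpa using hcase),
        List.getElem_map, List.getElem_append_left (by simp; omega),
        List.getElem_drop, List.getElem_range]
      have e1 : l.getD i "" = l[i] := List.getD_eq_getElem l "" hi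
      have e2 : l.getD (i+1) "" = l[1+i] := by
        rw [List.getD_eq_getElem l "" (by omega)]; congr 1; omega
      rw [e1, e2]
    · have hie : i = l.length - 1 := by omega
      have hdl : (l.drop 1).length = l.length - 1 := by simp
      rw [List.getElem_append_right (by simp; omega),
        List.getElem_append_right (by omega)]
      simp only [List.length_map, List.length_range, hdl, hie]
      simp [List.getElem?_eq_getElem (show l.length - 1 < l.length by omega)]

-- ===== VERDICT (by name: the statement is the Claim_ definition above) =====
theorem generate_module_spec : Claim_equal_generate_module := by
  intro name tn tid _ hpre
  unfold Pre_generate_module at hpre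
  unfold Spec_generate_module generate_module generate_module_alt
  have hne : ((PySem.List.pyRange 1 (tn + 1) 1).map
      (fun nb => tid ++ "_" ++ PySem.Int.toStr nb)) ≠ [] := by
    apply List.ne_nil_of_length_pos
    simp only [List.length_map, PySem.List.length_pyRange_one]
    omega
  simp only [Prod.mk.injEq]
  exact ⟨trivial, trivial, trivial, pv_loop_eq
    (fun cur nxt => "  [a_" ++ cur ++ "] " ++ cur ++ " = true & "
      ++ tid ++ "_P = " ++ "-> (1 - Prob" ++ cur ++ "):("
      ++ cur ++ "' = false) & (" ++ nxt ++ "' = true) & ("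
      ++ tid ++ "_P' = )" ++ "+ Prob" ++ cur ++ ":("
      ++ cur ++ "' = true);") _ hne⟩
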